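-- pv_equiv track=rewrite | github.com/Akongstad/APS2023Exam | buzzwords/buzzwords_wa_no_dp.py | count_repeated_words
-- ===== SOURCE A (Python) =====
-- def count_repeated_words(line):  # Count repeated words in line
--     output_lines = []  # Output lines
--
--     for length in range(1, len(line) + 1):  # Iterate through all possible lengths
--         repeated_words = set()  # Set of repeated words
--         # Iterate through all possible starting indices
--         for i in range(len(line) - length + 1):
--             word = line[i:i+length]  # Get word
--             if word in line[i+1:]:  # If word is repeated
--                 repeated_words.add(word)  # Add word to set of repeated words
--
--         if repeated_words:  # If there are repeated words
--             # Append count of repeated words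
--             output_lines.append(str(len(repeated_words)))
--         else:  # If there are no repeated words
--             output_lines.append("")  # Append empty line
--             break
--
--     return output_lines  # Return output lines
-- ===== SOURCE B (Python) =====
-- def count_repeated_words(line):
--     # Sort the windows of each length, then count runs of equal neighbours
--     # (a run of length >= 2 is one repeated word), instead of scanning the
--     # remaining suffix for every start index.
--     out = []
--     n = len(line)
--     for length in range(1, n + 1):
--         subs = sorted(line[i:i+length] for i in range(n - length + 1))
--         rep = 0
--         m = len(subs)
--         k = 0
--         while k < m:
--             j = k + 1
--             while j < m and subs[j] == subs[k]:
--                 j += 1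
--             if j - k >= 2:
--                 rep += 1
--             k = j
--         if rep:
--             out.append(str(rep))
--         else:
--             out.append("")
--             break
--     return out
-- ===== Notes on version B (the rewrite author's own statement) =====
-- stated objective: faster
-- what changed: Per length, A tests each start index by scanning the whole remaining suffix for another occurrence of the window; B instead sorts the windows of that length and counts runs of equal adjacent entries (each run of length >= 2 is one repeated word), removing the inner suffix scan.
import Mathlib
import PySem

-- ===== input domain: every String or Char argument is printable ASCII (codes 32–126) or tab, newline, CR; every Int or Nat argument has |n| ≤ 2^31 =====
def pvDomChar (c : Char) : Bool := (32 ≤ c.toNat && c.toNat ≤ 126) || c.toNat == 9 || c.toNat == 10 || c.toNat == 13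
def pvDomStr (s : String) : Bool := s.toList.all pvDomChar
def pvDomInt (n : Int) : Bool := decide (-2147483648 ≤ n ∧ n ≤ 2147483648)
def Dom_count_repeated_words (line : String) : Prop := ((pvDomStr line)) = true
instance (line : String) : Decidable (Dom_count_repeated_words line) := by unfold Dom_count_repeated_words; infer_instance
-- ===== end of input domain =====

-- B replaces A's per-start-index suffix scan ('word in line[i+1:]') by sorting the windows
-- of each length and counting runs of equal neighbours (one run of length ≥ 2 = one repeated word).

-- ===== PORT A =====
-- the inner 'for i in range(...)' loop building the set of repeated words of one length
def crwRepeatedSetA (line : String) (length : Int) : PySem.Set String :=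
  (PySem.List.pyRange 0 (PySem.Str.len line - length + 1) 1).foldl
    (fun s i =>
      let word := PySem.Str.slice line (some i) (some (i + length))
      if PySem.Str.isIn word (PySem.Str.slice line (some (i + 1)) none) then s.add word else s)
    PySem.Set.empty

-- the outer 'for length in range(1, len(line)+1)' loop with its early 'break'
def crwLoopA (line : String) : List Int → List String → List String
  | [], output_lines => output_lines
  | length :: rest, output_lines =>
    let repeated_words := crwRepeatedSetA line length
    if repeated_words ≠ ([] : List String) then
      crwLoopA line rest (output_lines ++ [PySem.Int.toStr (PySem.Set.len repeated_words)])
    else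
      output_lines ++ [""]

def count_repeated_words (line : String) : List String :=
  crwLoopA line (PySem.List.pyRange 1 (PySem.Str.len line + 1) 1) []

-- ===== PORT B =====
-- 'subs = sorted(line[i:i+length] for i in range(n - length + 1))'
def crwWinsB (line : String) (length : Int) : List String :=
  PySem.List.sorted
    ((PySem.List.pyRange 0 (PySem.Str.len line - length + 1) 1).map
      (fun i => PySem.Str.slice line (some i) (some (i + length))))
    (fun x => x) false

-- the 'while k < m' run scan: the inner 'while j < m and subs[j] == subs[k]' advance
-- is the takeWhile/dropWhile split of the tail at the current element
def crwRuns : List String → Int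
  | [] => 0
  | x :: xs =>
    (if xs.takeWhile (fun y => y == x) ≠ [] then 1 else 0) +
      crwRuns (xs.dropWhile (fun y => y == x))
termination_by l => l.length
decreasing_by
  simpa using Nat.lt_succ_of_le (List.length_dropWhile_le _ _)

-- outer 'for length' loop of Source B, building the output front to back
def crwLoopB (line : String) : List Int → List String
  | [] => []
  | length :: rest =>
    let rep := crwRuns (crwWinsB line length)
    if rep ≠ 0 then PySem.Int.toStr rep :: crwLoopB line rest
    else [""]

def count_repeated_words_alt (line : String) : List String :=
  crwLoopB line (PySem.List.pyRange 1 (PySem.Str.len line + 1) 1)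

-- ===== PRECONDITION & SPEC =====
def Spec_count_repeated_words (line : String) (out : List String) : Prop := out = count_repeated_words_alt line
instance (line : String) (out : List String) : Decidable (Spec_count_repeated_words line out) := by unfold Spec_count_repeated_words; infer_instance

-- ===== CLAIM (what is proved, stated in full; the proofs are below) =====
def Claim_equal_count_repeated_words : Prop := ∀ (line : String), Dom_count_repeated_words line → Spec_count_repeated_words line (count_repeated_words line)

-- ===== LEMMAS AND PROOFS =====

-- the substring of line of given length starting at Nat index k, as both ports compute it
def crwW (line : String) (length : Int) (k : Nat) : String :=
  PySem.Str.slice line (some (k : Int)) (some ((k : Int) + length))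

-- all substrings of one length, in start-index order
def crwSubs (line : String) (length : Int) : List String :=
  (List.range ((PySem.Str.len line - length + 1).toNat)).map (crwW line length)

-- membership in a 'add-if' fold over a set
theorem crw_mem_foldl_add_if {ι : Type} (p : ι → Bool) (f : ι → String) (l : List ι)
    (s₀ : PySem.Set String) (x : String) :
    x ∈ l.foldl (fun s i => if p i then s.add (f i) else s) s₀ ↔
      x ∈ s₀ ∨ ∃ i ∈ l, p i ∧ f i = x := by
  induction l generalizing s₀ with
  | nil => simp
  | cons a t ih =>
    simp only [List.foldl_cons]
    by_cases h : p a = true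
    · rw [if_pos h, ih]
      simp only [PySem.Set.mem_add, List.mem_cons]
      constructor
      · rintro (h1 | ⟨i, hi, hp, hf⟩)
        · rcases h1 with h1 | h1
          · exact Or.inl h1
          · exact Or.inr ⟨a, Or.inl rfl, h, h1.symm⟩
        · exact Or.inr ⟨i, Or.inr hi, hp, hf⟩
      · rintro (h1 | ⟨i, (rfl | hi), hp, hf⟩)
        · exact Or.inl (Or.inl h1)
        · exact Or.inl (Or.inr hf.symm)
        · exact Or.inr ⟨i, hi, hp, hf⟩
    · rw [if_neg h, ih]
      simp only [List.mem_cons]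
      constructor
      · rintro (h1 | ⟨i, hi, hp, hf⟩)
        · exact Or.inl h1
        · exact Or.inr ⟨i, Or.inr hi, hp, hf⟩
      · rintro (h1 | ⟨i, (rfl | hi), hp, hf⟩)
        · exact Or.inl h1
        · exact absurd hp h
        · exact Or.inr ⟨i, hi, hp, hf⟩

theorem crw_nodup_foldl_add_if {ι : Type} (p : ι → Bool) (f : ι → String) (l : List ι)
    (s₀ : PySem.Set String) (h : s₀.Nodup) :
    (l.foldl (fun s i => if p i then s.add (f i) else s) s₀).Nodup := by
  induction l generalizing s₀ with
  | nil => exact h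
  | cons a t ih =>
    simp only [List.foldl_cons]
    by_cases hp : p a = true
    · simp only [hp, if_true]; exact ih _ (PySem.Set.nodup_add _ _ h)
    · rw [if_neg hp]; exact ih _ h

-- list-level heart: a window repeats further right iff it occurs at a strictly later start
theorem crw_infix_iff_later (s : List Char) (LN a : Nat) (hL : 1 ≤ LN) (ha : a + LN ≤ s.length) :
    (s.drop a).take LN <:+: s.drop (a + 1) ↔
      ∃ b, a < b ∧ b + LN ≤ s.length ∧ (s.drop b).take LN = (s.drop a).take LN := by
  have hwlen : ((s.drop a).take LN).length = LN := by
    simp [List.length_take, List.length_drop]; omega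
  constructor
  · rintro ⟨t₁, t₂, h⟩
    refine ⟨a + 1 + t₁.length, by omega, ?_, ?_⟩
    · have hlen := congrArg List.length h
      simp [List.length_drop, hwlen] at hlen
      omega
    · have hdrop : s.drop (a + 1 + t₁.length) = (s.drop a).take LN ++ t₂ := by
        have : s.drop (a + 1 + t₁.length) = (s.drop (a + 1)).drop t₁.length := by
          rw [List.drop_drop]
        rw [this, ← h, List.append_assoc, List.drop_left]
      rw [hdrop, List.take_left' hwlen]
  · rintro ⟨b, hab, hbLN, heq⟩
    have h1 : (s.drop b).take LN <+: s.drop b := List.take_prefix _ _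
    have h2 : s.drop b = (s.drop (a + 1)).drop (b - (a + 1)) := by
      rw [List.drop_drop]
      congr 1
      omega
    rw [← heq]
    exact h1.isInfix.trans (h2 ▸ (List.drop_suffix _ _).isInfix)

-- the toList of a window
theorem crw_toList_w (line : String) (L : Int) (hL : 0 ≤ L) (k : Nat) :
    (crwW line L k).toList = (line.toList.drop k).take L.toNat := by
  unfold crwW
  rw [PySem.Str.toList_slice, PySem.Chars.slice_eq_listSlice]
  have h : (some ((k : Int) + L)) = some ((k : Int) + ((L.toNat : Nat) : Int)) := by
    rw [Int.toNat_of_nonneg hL]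
  rw [h, PySem.List.slice_natCast_add]

-- A's test 'word in line[i+1:]', characterised by later equal windows
theorem crw_isIn_iff (line : String) (L : Int) (h1 : 1 ≤ L) (k : Nat)
    (hk : (k : Int) < PySem.Str.len line - L + 1) :
    PySem.Str.isIn (crwW line L k) (PySem.Str.slice line (some ((k : Int) + 1)) none) = true ↔
      ∃ j : Nat, k < j ∧ (j : Int) < PySem.Str.len line - L + 1 ∧ crwW line L j = crwW line L k := by
  have hlen : PySem.Str.len line = (line.toList.length : Int) := PySem.Str.len_eq line
  have hsuf : (PySem.Str.slice line (some ((k : Int) + 1)) none).toList = line.toList.drop (k + 1) := by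
    rw [PySem.Str.toList_slice, PySem.Chars.slice_eq_listSlice,
      PySem.List.slice_from _ (by omega : (0:Int) ≤ (k : Int) + 1)]
    have heq : ((k : Int) + 1).toNat = k + 1 := by omega
    rw [heq]
  rw [PySem.Str.isIn_iff_infix, hsuf, crw_toList_w line L (by omega) k]
  rw [crw_infix_iff_later line.toList L.toNat k (by omega) (by omega)]
  constructor
  · rintro ⟨b, hab, hbLN, heq⟩
    refine ⟨b, hab, by omega, ?_⟩
    rw [← String.toList_inj, crw_toList_w line L (by omega) b, crw_toList_w line L (by omega) k]
    exact heq
  · rintro ⟨j, hkj, hjm, heq⟩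
    refine ⟨j, hkj, by omega, ?_⟩
    rw [← crw_toList_w line L (by omega) j, ← crw_toList_w line L (by omega) k, heq]

-- counting: an element of a mapped range has multiplicity ≥ 2 iff it appears at two indices
theorem crw_two_le_count_iff (f : Nat → String) (x : String) (m : Nat) :
    2 ≤ List.count x ((List.range m).map f) ↔
      ∃ a b, a < b ∧ b < m ∧ f a = x ∧ f b = x := by
  induction m with
  | zero => simp
  | succ m ih =>
    rw [List.range_succ, List.map_append, List.count_append]
    by_cases h : f m = x
    · simp only [List.map_cons, List.map_nil, List.count_singleton, h]
      simp only [BEq.rfl, if_true]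
      constructor
      · intro hc
        have h1 : 0 < List.count x ((List.range m).map f) := by omega
        rw [List.count_pos_iff] at h1
        obtain ⟨a, ha, hfa⟩ := List.mem_map.mp h1
        exact ⟨a, m, List.mem_range.mp ha, by omega, hfa, h⟩
      · rintro ⟨a, b, hab, hbm, hfa, hfb⟩
        have h1 : 0 < List.count x ((List.range m).map f) := by
          rw [List.count_pos_iff]
          exact List.mem_map.mpr ⟨a, List.mem_range.mpr (by omega), hfa⟩
        omega
    · simp only [List.map_cons, List.map_nil, List.count_singleton]
      rw [if_neg (by simpa using h)]
      rw [Nat.add_zero, ih]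
      constructor
      · rintro ⟨a, b, hab, hbm, hfa, hfb⟩
        exact ⟨a, b, hab, by omega, hfa, hfb⟩
      · rintro ⟨a, b, hab, hbm, hfa, hfb⟩
        refine ⟨a, b, hab, ?_, hfa, hfb⟩
        rcases Nat.lt_succ_iff_lt_or_eq.mp hbm with hb | hb
        · exact hb
        · exact absurd (hb ▸ hfb) h

-- A's set of one length, as a list: length = number of distinct windows of multiplicity ≥ 2
theorem crw_setA_length (line : String) (L : Int) (h1 : 1 ≤ L) :
    (crwRepeatedSetA line L).length =
      List.countP (fun x => decide (2 ≤ List.count x (crwSubs line L))) (PySem.Set.ofList (crwSubs line L)) := by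
  have hm : crwRepeatedSetA line L =
      (List.range ((PySem.Str.len line - L + 1).toNat)).foldl
        (fun s k => if PySem.Str.isIn (crwW line L k) (PySem.Str.slice line (some ((k : Int) + 1)) none)
                    then s.add (crwW line L k) else s) PySem.Set.empty := by
    unfold crwRepeatedSetA
    rw [PySem.List.pyRange_one, List.foldl_map]
    simp [crwW]
  have hmem : ∀ x, x ∈ crwRepeatedSetA line L ↔ 2 ≤ List.count x (crwSubs line L) := by
    intro x
    rw [hm, crw_mem_foldl_add_if]
    unfold crwSubs
    rw [crw_two_le_count_iff]
    constructor
    · rintro (h0 | ⟨k, hk, hp, hf⟩)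
      · cases h0
      · have hk' : (k : Int) < PySem.Str.len line - L + 1 := by
          have := List.mem_range.mp hk; omega
        obtain ⟨j, hkj, hjm, heq⟩ := (crw_isIn_iff line L h1 k hk').mp hp
        exact ⟨k, j, hkj, by omega, hf, by rw [heq, hf]⟩
    · rintro ⟨a, b, hab, hbm, hfa, hfb⟩
      refine Or.inr ⟨a, List.mem_range.mpr (by omega), ?_, hfa⟩
      refine (crw_isIn_iff line L h1 a (by omega)).mpr ⟨b, hab, by omega, ?_⟩
      rw [hfb, hfa]
  have hnodupA : (crwRepeatedSetA line L).Nodup := by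
    rw [hm]; exact crw_nodup_foldl_add_if _ _ _ _ List.nodup_nil
  have hperm : (crwRepeatedSetA line L).Perm
      ((PySem.Set.ofList (crwSubs line L)).filter
        (fun x => decide (2 ≤ List.count x (crwSubs line L)))) := by
    rw [List.perm_ext_iff_of_nodup hnodupA (List.Nodup.filter _ (PySem.Set.nodup_ofList _))]
    intro x
    rw [hmem x, List.mem_filter, PySem.Set.mem_ofList]
    constructor
    · intro h2
      exact ⟨List.count_pos_iff.mp (by omega), by simpa using h2⟩
    · rintro ⟨_, h2⟩
      simpa using h2
  rw [List.countP_eq_length_filter]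
  exact hperm.length_eq

-- run counting on a sorted list: crwRuns counts the distinct elements of multiplicity ≥ 2
theorem crw_runs_eq_countP (l : List String) (hs : l.Pairwise (· ≤ ·)) :
    ∀ d : List String, d.Nodup → (∀ x, x ∈ d ↔ x ∈ l) →
      crwRuns l = (List.countP (fun x => decide (2 ≤ List.count x l)) d : Int) := by
  induction l using crwRuns.induct with
  | case1 =>
    intro d _ hm
    have : d = [] := List.eq_nil_iff_forall_not_mem.mpr (fun x hx => by simpa using (hm x).mp hx)
    simp [crwRuns, this]
  | case2 x xs ih =>
    intro d hd hm
    set t := xs.takeWhile (fun y => y == x) with ht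
    set r := xs.dropWhile (fun y => y == x) with hr
    have hxs : t ++ r = xs := List.takeWhile_append_dropWhile
    have hallt : ∀ y ∈ t, y = x := by
      intro y hy
      have := List.mem_takeWhile_imp hy
      simpa using this
    have hpcons := List.pairwise_cons.mp hs
    have hxle : ∀ y ∈ xs, x ≤ y := hpcons.1
    have hrsub : r.Sublist xs := (List.dropWhile_suffix _).sublist
    have hrp : r.Pairwise (· ≤ ·) := hpcons.2.sublist hrsub
    have hxnr : x ∉ r := by
      intro hx
      cases hhead : r with
      | nil => rw [hhead] at hx; cases hx
      | cons h rt =>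
        have hhne : ¬ (h == x) = true := by
          have := List.head?_dropWhile_not (fun y => y == x) xs
          rw [← hr, hhead] at this
          simpa using this
        have hhne' : h ≠ x := by simpa using hhne
        rw [hhead] at hx
        rcases List.mem_cons.mp hx with hx | hx
        · exact hhne' hx.symm
        · have hh_le : h ≤ x := by
            rw [hhead] at hrp
            exact (List.pairwise_cons.mp hrp).1 x hx
          have hx_le : x ≤ h := hxle h (hrsub.mem (hhead ▸ List.mem_cons_self ..))
          exact hhne' (le_antisymm hh_le hx_le)
    have hcountx : List.count x (x :: xs) = 1 + t.length := by
      rw [List.count_cons_self, ← hxs, List.count_append]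
      rw [List.count_eq_zero.mpr hxnr, Nat.add_zero]
      rw [List.count_eq_length.mpr (fun b hb => (hallt b hb).symm)]
      omega
    have hcounty : ∀ y, y ≠ x → List.count y (x :: xs) = List.count y r := by
      intro y hy
      rw [← hxs, List.count_cons, List.count_append]
      rw [List.count_eq_zero.mpr (fun hmem => hy (hallt y hmem))]
      simp [Ne.symm hy]
    have hxd : x ∈ d := (hm x).mpr (List.mem_cons_self ..)
    have hpermd : d.Perm (x :: d.erase x) := List.perm_cons_erase hxd
    have hcd : List.countP (fun y => decide (2 ≤ List.count y (x :: xs))) d =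
        (if 2 ≤ List.count x (x :: xs) then 1 else 0) +
          List.countP (fun y => decide (2 ≤ List.count y (x :: xs))) (d.erase x) := by
      rw [hpermd.countP_eq, List.countP_cons]
      simp only [decide_eq_true_eq]
      split_ifs <;> omega
    have hmemerase : ∀ y, y ∈ d.erase x ↔ y ∈ r := by
      intro y
      rw [hd.mem_erase_iff, hm]
      constructor
      · rintro ⟨hyx, hy⟩
        rcases List.mem_cons.mp hy with h | h
        · exact absurd h hyx
        · rw [← hxs] at h
          rcases List.mem_append.mp h with h | h
          · exact absurd (hallt y h) hyx
          · exact h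
      · intro hy
        have hyx : y ≠ x := fun h => hxnr (h ▸ hy)
        exact ⟨hyx, List.mem_cons_of_mem _ (hrsub.mem hy)⟩
    have hcongr : List.countP (fun y => decide (2 ≤ List.count y (x :: xs))) (d.erase x) =
        List.countP (fun y => decide (2 ≤ List.count y r)) (d.erase x) := by
      refine List.countP_congr ?_
      intro y hy
      have hyr : y ∈ r := (hmemerase y).mp hy
      have hyx : y ≠ x := fun h => hxnr (h ▸ hyr)
      rw [hcounty y hyx]
    have hih := ih hrp (d.erase x) (hd.erase x) hmemerase
    rw [crwRuns, ← ht, ← hr, hih, hcd, hcongr]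
    have hiff : (2 ≤ List.count x (x :: xs)) ↔ t ≠ [] := by
      rw [hcountx]
      constructor
      · intro h2 hnil
        rw [hnil] at h2
        simp at h2
      · intro hne
        have : 0 < t.length := List.length_pos_of_ne_nil hne
        omega
    by_cases hc : t ≠ []
    · rw [if_pos hc, if_pos (hiff.mpr hc)]
      push_cast
      ring
    · rw [if_neg hc, if_neg (fun h => hc (hiff.mp h))]
      push_cast
      ring

-- B's window list is crwSubs
theorem crw_winsB_eq (line : String) (L : Int) :
    crwWinsB line L = PySem.List.sorted (crwSubs line L) (fun x => x) false := by
  unfold crwWinsB crwSubs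
  rw [PySem.List.pyRange_one, List.map_map]
  simp only [Int.sub_zero]
  congr 1
  refine List.map_congr_left ?_
  intro k _
  simp [crwW, Function.comp]

-- B's per-length count equals A's quantity
theorem crw_runsB_eq (line : String) (L : Int) :
    crwRuns (crwWinsB line L) =
      (List.countP (fun x => decide (2 ≤ List.count x (crwSubs line L))) (PySem.Set.ofList (crwSubs line L)) : Int) := by
  rw [crw_winsB_eq]
  set S := PySem.List.sorted (crwSubs line L) (fun x => x) false with hS
  have hperm : S.Perm (crwSubs line L) := PySem.List.sorted_perm _ _ _
  have hpw : S.Pairwise (· ≤ ·) := by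
    have := PySem.List.sorted_pairwise (crwSubs line L) (fun x => x)
    simpa using this
  have := crw_runs_eq_countP S hpw (PySem.Set.ofList (crwSubs line L))
    (PySem.Set.nodup_ofList _)
    (fun x => by rw [PySem.Set.mem_ofList, hperm.mem_iff])
  rw [this]
  congr 1
  refine List.countP_congr ?_
  intro y _
  rw [hperm.count_eq]

-- the two outer loops agree
theorem crw_loop_eq (line : String) (lens : List Int) (out : List String)
    (h : ∀ L ∈ lens, 1 ≤ L) :
    crwLoopA line lens out = out ++ crwLoopB line lens := by
  induction lens generalizing out with
  | nil => simp [crwLoopA, crwLoopB]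
  | cons L rest ih =>
    have h1 : 1 ≤ L := h L (List.mem_cons_self ..)
    have hrep : crwRuns (crwWinsB line L) = ((crwRepeatedSetA line L).length : Int) := by
      rw [crw_runsB_eq, crw_setA_length line L h1]
    have hlen : PySem.Set.len (crwRepeatedSetA line L) = ((crwRepeatedSetA line L).length : Int) := rfl
    simp only [crwLoopA, crwLoopB, hrep, hlen]
    by_cases hne : crwRepeatedSetA line L = ([] : List String)
    · rw [if_neg (by simp [hne]), if_neg (by simp [hne])]
    · have hlpos : (crwRepeatedSetA line L).length ≠ 0 := by
        simpa [List.length_eq_zero_iff] using hne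
      rw [if_pos (by simpa using hne), if_pos (by simpa using hlpos)]
      rw [ih _ (fun L' hL' => h L' (List.mem_cons_of_mem _ hL'))]
      simp

-- ===== VERDICT (by name: the statement is the Claim_ definition above) =====
theorem count_repeated_words_spec : Claim_equal_count_repeated_words := by
  intro line _
  show count_repeated_words line = count_repeated_words_alt line
  unfold count_repeated_words count_repeated_words_alt
  rw [crw_loop_eq line _ [] (fun L hL => (PySem.List.mem_pyRange_one.mp hL).1)]
  rfl
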